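-- pv_equiv track=rewrite | github.com/ibhayb/SoftwareProject-HayberKresovic | jack-resources/Dynamic_Task_Generation/dijkstra_2/formatter_to_xml.py | generate_image_resources_from_array
-- ===== SOURCE A (Python) =====
-- def format_single_input_image_to_xml(file_name, content, image_timestamp, current_id):
--     """
--     Formats a single input string into an XML ExerciseResource block.
--     """
--     xml_output = f"""
-- <ExerciseResource id="{current_id + 1}">
--     <content id="{current_id + 2}">
--         {content}
--     </content>
--     <uploadTimestamp>{image_timestamp}</uploadTimestamp>
--     <filename>{file_name}</filename>
--     <description></description>
--     <replacePlaceholder>false</replacePlaceholder>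
-- </ExerciseResource>
-- """
--     return xml_output, current_id + 2
--
-- def generate_image_resources_from_array(start_id, image_input_array):
--     resources = []
--     current_id = start_id
--     current_id = current_id + 1
--     for (file_name, content, image_timestamp) in image_input_array:
--         # generate and append the resources
--         xml_output, current_id = format_single_input_image_to_xml(file_name, content, image_timestamp, current_id)
--         resources.append(xml_output)
--     return resources
-- ===== SOURCE B (Python) =====
-- def generate_image_resources_from_array(start_id, image_input_array):
--     return [
--         f"""
-- <ExerciseResource id="{start_id + 2 + 2 * i}">
--     <content id="{start_id + 3 + 2 * i}">
--         {content}
--     </content>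
--     <uploadTimestamp>{image_timestamp}</uploadTimestamp>
--     <filename>{file_name}</filename>
--     <description></description>
--     <replacePlaceholder>false</replacePlaceholder>
-- </ExerciseResource>
-- """
--         for i, (file_name, content, image_timestamp) in enumerate(image_input_array)
--     ]
-- ===== Notes on version B (the rewrite author's own statement) =====
-- stated objective: simpler
-- what changed: Replaces the helper function and its threaded current_id accumulator with a single list comprehension that computes each block's ids in closed form from the enumerate index (start_id+2+2*i and start_id+3+2*i).
import Mathlib
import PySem

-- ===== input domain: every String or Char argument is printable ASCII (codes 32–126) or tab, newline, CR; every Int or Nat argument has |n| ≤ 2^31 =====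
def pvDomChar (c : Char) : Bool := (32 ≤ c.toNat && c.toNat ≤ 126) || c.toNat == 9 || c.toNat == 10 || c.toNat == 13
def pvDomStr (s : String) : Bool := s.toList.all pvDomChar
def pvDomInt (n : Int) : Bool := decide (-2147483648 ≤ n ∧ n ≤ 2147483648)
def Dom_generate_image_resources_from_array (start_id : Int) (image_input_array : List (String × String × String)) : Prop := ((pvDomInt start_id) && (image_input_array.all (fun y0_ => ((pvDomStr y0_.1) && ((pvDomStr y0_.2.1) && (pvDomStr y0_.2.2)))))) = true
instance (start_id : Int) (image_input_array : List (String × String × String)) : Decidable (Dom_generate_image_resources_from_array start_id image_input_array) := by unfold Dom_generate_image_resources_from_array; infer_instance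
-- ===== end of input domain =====

-- B replaces A's helper and threaded current_id with a single map over enumerate computing each block's ids in closed form from the index (alternative decomposition; same cost).


-- ===== PORT A =====
def pvFmtSingle (file_name content image_timestamp : String) (current_id : Int) : String × Int :=
  ("\n<ExerciseResource id=\"" ++ PySem.Int.toStr (current_id + 1) ++ "\">\n    <content id=\"" ++ PySem.Int.toStr (current_id + 2) ++ "\">\n        " ++ content ++ "\n    </content>\n    <uploadTimestamp>" ++ image_timestamp ++ "</uploadTimestamp>\n    <filename>" ++ file_name ++ "</filename>\n    <description></description>\n    <replacePlaceholder>false</replacePlaceholder>\n</ExerciseResource>\n", current_id + 2)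

def generate_image_resources_from_array (start_id : Int) (image_input_array : List (String × String × String)) : List String :=
  (image_input_array.foldl
    (fun (st : List String × Int) it =>
      let r := pvFmtSingle it.1 it.2.1 it.2.2 st.2
      (st.1 ++ [r.1], r.2))
    ([], start_id + 1)).1

-- ===== PORT B =====
def generate_image_resources_from_array_alt (start_id : Int) (image_input_array : List (String × String × String)) : List String :=
  (PySem.List.enumerate image_input_array).map (fun p =>
    "\n<ExerciseResource id=\"" ++ PySem.Int.toStr (start_id + 2 + 2 * p.1) ++ "\">\n    <content id=\"" ++ PySem.Int.toStr (start_id + 3 + 2 * p.1) ++ "\">\n        " ++ p.2.2.1 ++ "\n    </content>\n    <uploadTimestamp>" ++ p.2.2.2 ++ "</uploadTimestamp>\n    <filename>" ++ p.2.1 ++ "</filename>\n    <description></description>\n    <replacePlaceholder>false</replacePlaceholder>\n</ExerciseResource>\n")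

-- ===== PRECONDITION & SPEC =====
def Spec_generate_image_resources_from_array (start_id : Int) (image_input_array : List (String × String × String)) (out : List String) : Prop := out = generate_image_resources_from_array_alt start_id image_input_array
instance (start_id : Int) (image_input_array : List (String × String × String)) (out : List String) : Decidable (Spec_generate_image_resources_from_array start_id image_input_array out) := by unfold Spec_generate_image_resources_from_array; infer_instance

-- ===== CLAIM (what is proved, stated in full; the proofs are below) =====
def Claim_equal_generate_image_resources_from_array : Prop := ∀ (start_id : Int) (image_input_array : List (String × String × String)), Dom_generate_image_resources_from_array start_id image_input_array → Spec_generate_image_resources_from_array start_id image_input_array (generate_image_resources_from_array start_id image_input_array)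

-- ===== LEMMAS AND PROOFS =====
-- helper naming A's per-item block as a function of the current_id (proof-side only)
def pvBlock (c : Int) (it : String × String × String) : String :=
  (pvFmtSingle it.1 it.2.1 it.2.2 c).1

lemma pv_fold_enum (l : List (String × String × String)) (acc : List String) (s t : Int) :
    (l.foldl
      (fun (st : List String × Int) it =>
        let r := pvFmtSingle it.1 it.2.1 it.2.2 st.2
        (st.1 ++ [r.1], r.2))
      (acc, s)).1 =
    acc ++ (PySem.List.enumerate l t).map (fun p => pvBlock (s + 2 * (p.1 - t)) p.2) := by
  induction l generalizing acc s t with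
  | nil => simp [PySem.List.enumerate_nil]
  | cons hd tl ih =>
    simp only [List.foldl_cons, PySem.List.enumerate_cons, List.map_cons]
    rw [ih _ _ (t + 1)]
    have hhd : pvBlock (s + 2 * (t - t)) hd = (pvFmtSingle hd.1 hd.2.1 hd.2.2 s).1 := by
      simp [pvBlock]
    have htl : (PySem.List.enumerate tl (t + 1)).map
        (fun p => pvBlock (s + 2 + 2 * (p.1 - (t + 1))) p.2) =
        (PySem.List.enumerate tl (t + 1)).map
        (fun p => pvBlock (s + 2 * (p.1 - t)) p.2) := by
      apply List.map_congr_left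
      intro p _
      have : s + 2 + 2 * (p.1 - (t + 1)) = s + 2 * (p.1 - t) := by ring
      rw [this]
    simp only [pvFmtSingle] at *
    rw [hhd, htl]
    simp

-- ===== VERDICT (by name: the statement is the Claim_ definition above) =====
theorem generate_image_resources_from_array_spec : Claim_equal_generate_image_resources_from_array := by
  intro start_id l _
  unfold Spec_generate_image_resources_from_array
  unfold generate_image_resources_from_array generate_image_resources_from_array_alt
  rw [pv_fold_enum l [] (start_id + 1) 0]
  simp only [List.nil_append]
  apply List.map_congr_left
  intro p _
  simp only [pvBlock, pvFmtSingle]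
  have h1 : start_id + 1 + 2 * (p.1 - 0) + 1 = start_id + 2 + 2 * p.1 := by ring
  have h2 : start_id + 1 + 2 * (p.1 - 0) + 2 = start_id + 3 + 2 * p.1 := by ring
  rw [h1, h2]
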